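-- pv_equiv track=rewrite | github.com/ebleb/JosephsonCircuitsGui | logic/simulation.py | resolve_hb_branch_name
-- ===== SOURCE A (Python) =====
-- def resolve_hb_branch_name(data, raw_name):
--     if raw_name in ["", None]:
--         return None
--
--     raw = str(raw_name).strip()
--     instances = data.get("instances", []) or []
--
--     def generated_name(inst):
--         return f"{inst.get('type_name')}_{inst.get('uid')}"
--
--     # Exact UID match in the flattened circuit.
--     for inst in instances:
--         uid = inst.get("uid")
--         if uid == raw:
--             return generated_name(inst)
--
--     # Already-expanded generated branch name.
--     for inst in instances:
--         if generated_name(inst) == raw: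
--             return raw
--
--     # Match local schematic names against flattened UIDs such as FL1_L2.
--     suffix = "_" + raw
--     matches = [inst for inst in instances if str(inst.get("uid", "")).endswith(suffix)]
--     if len(matches) == 1:
--         return generated_name(matches[0])
--
--     if len(matches) > 1:
--         raise ValueError(
--             f"Ambiguous HB branch reference {raw!r}; matches {[inst.get('uid') for inst in matches]}"
--         )
--
--     return None
-- ===== SOURCE B (Python) =====
-- def resolve_hb_branch_name(data, raw_name):
--     if raw_name in ["", None]:
--         return None
--
--     raw = str(raw_name).strip()
--     instances = data.get("instances", []) or []
--     suffix = "_" + raw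
--
--     # Single pass: remember the first exact-UID hit, whether any generated
--     # name equals raw, and all suffix matches; decide by priority afterwards.
--     first_exact = None
--     gen_hit = False
--     suffix_matches = []
--     for inst in instances:
--         gen = f"{inst.get('type_name')}_{inst.get('uid')}"
--         if first_exact is None and inst.get("uid") == raw:
--             first_exact = gen
--         if gen == raw:
--             gen_hit = True
--         if str(inst.get("uid", "")).endswith(suffix):
--             suffix_matches.append(inst)
--
--     if first_exact is not None:
--         return first_exact
--     if gen_hit:
--         return raw
--     if len(suffix_matches) == 1:
--         return f"{suffix_matches[0].get('type_name')}_{suffix_matches[0].get('uid')}"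
--     if len(suffix_matches) > 1:
--         raise ValueError(
--             f"Ambiguous HB branch reference {raw!r}; matches {[inst.get('uid') for inst in suffix_matches]}"
--         )
--     return None
-- ===== Notes on version B (the rewrite author's own statement) =====
-- stated objective: alternative
-- what changed: B resolves the name in a single pass over the instance list, accumulating the first exact-UID hit, a generated-name flag and the suffix matches, then applies A's priority once, instead of A's three sequential scans of the list.
import Mathlib
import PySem

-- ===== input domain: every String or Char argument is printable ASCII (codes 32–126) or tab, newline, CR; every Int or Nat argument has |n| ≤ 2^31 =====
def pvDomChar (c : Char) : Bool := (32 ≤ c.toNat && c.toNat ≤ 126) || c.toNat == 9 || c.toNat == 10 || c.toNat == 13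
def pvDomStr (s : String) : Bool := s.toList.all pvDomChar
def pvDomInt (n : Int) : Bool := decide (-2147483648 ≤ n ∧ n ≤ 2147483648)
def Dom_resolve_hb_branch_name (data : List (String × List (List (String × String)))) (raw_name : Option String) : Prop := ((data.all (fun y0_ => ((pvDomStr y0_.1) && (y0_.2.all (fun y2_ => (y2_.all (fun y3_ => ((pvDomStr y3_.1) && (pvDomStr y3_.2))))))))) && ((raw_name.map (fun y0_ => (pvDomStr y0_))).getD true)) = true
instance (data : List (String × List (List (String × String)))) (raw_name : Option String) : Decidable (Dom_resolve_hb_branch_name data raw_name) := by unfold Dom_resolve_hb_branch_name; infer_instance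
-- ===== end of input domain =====

-- B replaces A's three sequential passes over the instance list by ONE pass that
-- maintains (first exact-UID hit, any-generated-name flag, suffix matches), deciding
-- by the same priority afterwards; return values are identical wherever A returns.

-- ===== PORT A =====
-- f-string interpolation of a missing dict key: Python renders None as "None" (exact).
def pvOptStr (o : Option String) : String :=
  match o with
  | none => "None"
  | some s => s

def pvGenName (inst : List (String × String)) : String :=
  pvOptStr ((PySem.Dict.mk inst).get? "type_name") ++ "_" ++ pvOptStr ((PySem.Dict.mk inst).get? "uid")

-- A's first loop: return generated_name of the first instance whose uid equals raw.
def pvFindExact (instances : List (List (String × String))) (raw : String) : Option String :=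
  match instances with
  | [] => none
  | inst :: rest =>
    if (PySem.Dict.mk inst).get? "uid" = some raw then some (pvGenName inst)
    else pvFindExact rest raw

-- A's second loop: does any instance's generated name equal raw?
def pvAnyGen (instances : List (List (String × String))) (raw : String) : Bool :=
  match instances with
  | [] => false
  | inst :: rest =>
    if pvGenName inst == raw then true else pvAnyGen rest raw

def resolve_hb_branch_name (data : List (String × List (List (String × String)))) (raw_name : Option String) : Option String :=
  if raw_name = none ∨ raw_name = some "" then none
  else
    let raw := PySem.Str.strip (raw_name.getD "")
    let instances := (PySem.Dict.mk data).getD "instances" []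
    match pvFindExact instances raw with
    | some r => some r
    | none =>
      if pvAnyGen instances raw then some raw
      else
        let suffix := "_" ++ raw
        let ms := instances.filter (fun inst => PySem.Str.endswith ((PySem.Dict.mk inst).getD "uid" "") suffix)
        if ms.length = 1 then ms.head?.map pvGenName
        else none  -- length > 1 raises ValueError in Python; excluded by Pre_

-- ===== PORT B =====
-- B's single loop body over state (first_exact, gen_hit, suffix_matches).
def pvScanStep (raw suffix : String) (st : Option String × Bool × List (List (String × String))) (inst : List (String × String)) : Option String × Bool × List (List (String × String)) :=
  let gen := pvGenName inst
  let fe := match st.1 with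
            | some r => some r
            | none => if (PySem.Dict.mk inst).get? "uid" = some raw then some gen else none
  let gh := st.2.1 || (gen == raw)
  let sm := if PySem.Str.endswith ((PySem.Dict.mk inst).getD "uid" "") suffix then st.2.2 ++ [inst] else st.2.2
  (fe, gh, sm)

def resolve_hb_branch_name_alt (data : List (String × List (List (String × String)))) (raw_name : Option String) : Option String :=
  if raw_name = none ∨ raw_name = some "" then none
  else
    let raw := PySem.Str.strip (raw_name.getD "")
    let instances := (PySem.Dict.mk data).getD "instances" []
    let suffix := "_" ++ raw
    let st := instances.foldl (pvScanStep raw suffix) (none, false, [])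
    match st.1 with
    | some r => some r
    | none =>
      if st.2.1 then some raw
      else if st.2.2.length = 1 then st.2.2.head?.map pvGenName
      else none  -- > 1 suffix matches raises ValueError in Python; excluded by Pre_

-- ===== PRECONDITION & SPEC =====
-- Pre_ excludes exactly the inputs where A (and B) raise ValueError: raw names that hit
-- no exact UID and no generated name but are a '_'-suffix of two or more UIDs.
def pvPreCheck (data : List (String × List (List (String × String)))) (raw_name : Option String) : Bool :=
  match raw_name with
  | none => true
  | some s =>
    s == "" ||
    (let raw := PySem.Str.strip s
     let instances := (PySem.Dict.mk data).getD "instances" []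
     instances.any (fun inst => (PySem.Dict.mk inst).get? "uid" == some raw) ||
     instances.any (fun inst => pvGenName inst == raw) ||
     decide ((instances.filter (fun inst => PySem.Str.endswith ((PySem.Dict.mk inst).getD "uid" "") ("_" ++ raw))).length ≤ 1))

def Pre_resolve_hb_branch_name (data : List (String × List (List (String × String)))) (raw_name : Option String) : Prop :=
  pvPreCheck data raw_name = true

instance (data : List (String × List (List (String × String)))) (raw_name : Option String) : Decidable (Pre_resolve_hb_branch_name data raw_name) := by
  unfold Pre_resolve_hb_branch_name; infer_instance

def pvWitness_resolve_hb_branch_name : (List (String × List (List (String × String)))) × Option String :=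
  ([("instances", [[("uid", "L1"), ("type_name", "L")]])], some "L1")

def Spec_resolve_hb_branch_name (data : List (String × List (List (String × String)))) (raw_name : Option String) (out : Option String) : Prop := out = resolve_hb_branch_name_alt data raw_name
instance (data : List (String × List (List (String × String)))) (raw_name : Option String) (out : Option String) : Decidable (Spec_resolve_hb_branch_name data raw_name out) := by unfold Spec_resolve_hb_branch_name; infer_instance

-- ===== CLAIM (what is proved, stated in full; the proofs are below) =====
def Claim_equal_resolve_hb_branch_name : Prop := ∀ (data : List (String × List (List (String × String)))) (raw_name : Option String), Dom_resolve_hb_branch_name data raw_name → Pre_resolve_hb_branch_name data raw_name → Spec_resolve_hb_branch_name data raw_name (resolve_hb_branch_name data raw_name)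

-- ===== LEMMAS AND PROOFS =====
lemma pvAnyGen_cons (inst : List (String × String)) (rest : List (List (String × String))) (raw : String) :
    pvAnyGen (inst :: rest) raw = ((pvGenName inst == raw) || pvAnyGen rest raw) := by
  show (if pvGenName inst == raw then true else pvAnyGen rest raw) = _
  cases h : (pvGenName inst == raw) <;> simp_all

lemma pvFindExact_cons (inst : List (String × String)) (rest : List (List (String × String))) (raw : String) :
    pvFindExact (inst :: rest) raw
      = if (PySem.Dict.mk inst).get? "uid" = some raw then some (pvGenName inst) else pvFindExact rest raw := rfl

lemma pvScan_spec (raw suffix : String) (instances : List (List (String × String))) :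
    ∀ st : Option String × Bool × List (List (String × String)),
      instances.foldl (pvScanStep raw suffix) st =
        (st.1.or (pvFindExact instances raw),
         st.2.1 || pvAnyGen instances raw,
         st.2.2 ++ instances.filter (fun inst => PySem.Str.endswith ((PySem.Dict.mk inst).getD "uid" "") suffix)) := by
  induction instances with
  | nil => intro st; simp [pvFindExact, pvAnyGen]
  | cons inst rest ih =>
    rintro ⟨fe, gh, sm⟩
    rw [List.foldl_cons, ih]
    simp only [Prod.mk.injEq]
    refine ⟨?_, ?_, ?_⟩
    · show ((match fe with
             | some r => some r
             | none => if (PySem.Dict.mk inst).get? "uid" = some raw then some (pvGenName inst) else none).or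
               (pvFindExact rest raw)) = fe.or (pvFindExact (inst :: rest) raw)
      rw [pvFindExact_cons]
      cases fe <;> split_ifs <;> simp [Option.or]
    · show ((gh || (pvGenName inst == raw)) || pvAnyGen rest raw) = (gh || pvAnyGen (inst :: rest) raw)
      rw [pvAnyGen_cons, Bool.or_assoc]
    · show ((if PySem.Str.endswith ((PySem.Dict.mk inst).getD "uid" "") suffix then sm ++ [inst] else sm)
            ++ rest.filter (fun inst => PySem.Str.endswith ((PySem.Dict.mk inst).getD "uid" "") suffix))
          = sm ++ (inst :: rest).filter (fun inst => PySem.Str.endswith ((PySem.Dict.mk inst).getD "uid" "") suffix)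
      rw [List.filter_cons]
      split_ifs <;> simp_all

-- ===== VERDICT (by name: the statement is the Claim_ definition above) =====
theorem resolve_hb_branch_name_spec : Claim_equal_resolve_hb_branch_name := by
  intro data raw_name _ _
  unfold Spec_resolve_hb_branch_name resolve_hb_branch_name resolve_hb_branch_name_alt
  by_cases h : raw_name = none ∨ raw_name = some ""
  · simp [h]
  · simp only [if_neg h]
    rw [pvScan_spec]
    simp only [Option.none_or, Bool.false_or, List.nil_append]
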